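-- pv_equiv track=rewrite | github.com/pypi-data/pypi-mirror-399 | packages/docx-mailmerge2/docx_mailmerge2-1.0.1.tar.gz/docx_mailmerge2-1.0.1/src/mailmerge/field.py | _walk_options
-- ===== SOURCE A (Python) =====
-- def _walk_options(options):
--     while options:
--         flag = options[0][0:2]
--         if not flag:
--             options = options[1:]
--             continue
--         if options[0][2:]:  # no space after the flag
--             option = options[0][2:]
--             options = options[1:]
--         else:
--             option = options[1]
--             options = options[2:]
--         yield flag, option
-- ===== SOURCE B (Python) =====
-- def _walk_options(options):
--     # Single pass with a pending-flag state instead of reslicing the list.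
--     pending = None
--     for item in options:
--         if pending is not None:
--             yield pending, item
--             pending = None
--         elif not item:
--             continue
--         elif item[2:]:
--             yield item[:2], item[2:]
--         else:
--             pending = item[:2]
-- ===== Notes on version B (the rewrite author's own statement) =====
-- stated objective: faster
-- what changed: Replaces the while-loop that reslices the options list (options[1:]/options[2:]) and peeks at options[1] with a single for-loop over the list carrying a pending-flag state variable, so no list copies or index lookahead are needed.
import Mathlib
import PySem

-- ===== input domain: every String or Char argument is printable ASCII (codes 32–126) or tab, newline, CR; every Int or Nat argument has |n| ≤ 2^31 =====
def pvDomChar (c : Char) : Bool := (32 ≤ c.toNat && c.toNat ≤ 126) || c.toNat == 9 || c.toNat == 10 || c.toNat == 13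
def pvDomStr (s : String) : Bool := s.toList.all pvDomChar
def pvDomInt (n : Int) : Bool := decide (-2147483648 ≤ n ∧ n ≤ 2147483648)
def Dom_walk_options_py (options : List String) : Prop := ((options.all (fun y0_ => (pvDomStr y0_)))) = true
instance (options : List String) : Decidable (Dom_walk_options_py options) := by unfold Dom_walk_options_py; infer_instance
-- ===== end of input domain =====

-- B replaces A's while-loop over a repeatedly resliced list by one left fold carrying a
-- pending-flag state, avoiding the list copies A makes on every step (objective: faster,
-- measured; generator semantics: equivalence is about the yielded pairs).

-- ===== PORT A =====
-- while options: reslice options[1:] / options[2:]; options[1] via pyGet? (none = IndexError,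
-- excluded by Pre_; the port stops there).
def walk_options_py (options : List String) : List (String × String) :=
  match options with
  | [] => []
  | x :: rest =>
    let flag := PySem.Str.slice x (some 0) (some 2)
    if flag = "" then
      walk_options_py (PySem.List.slice (x :: rest) (some 1) none)
    else if PySem.Str.slice x (some 2) none ≠ "" then
      (flag, PySem.Str.slice x (some 2) none) ::
        walk_options_py (PySem.List.slice (x :: rest) (some 1) none)
    else
      match PySem.List.pyGet? (x :: rest) 1 with
      | some v => (flag, v) :: walk_options_py (PySem.List.slice (x :: rest) (some 2) none)
      | none => []   -- Python raises IndexError here (outside Pre_)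
  termination_by options.length
  decreasing_by
  · simp [PySem.List.slice_from_one]
  · simp [PySem.List.slice_from_one]
  · rw [show ((2 : Int)) = ((2 : Nat) : Int) from rfl, PySem.List.slice_from_natCast]
    simp

-- ===== PORT B =====
-- one foldl; state = (pairs yielded so far, pending flag awaiting its value)
def walk_options_py_alt (options : List String) : List (String × String) :=
  (options.foldl
    (fun (st : List (String × String) × Option String) item =>
      match st.2 with
      | some flag => (st.1 ++ [(flag, item)], none)
      | none =>
        if item = "" then st
        else if PySem.Str.slice item (some 2) none ≠ "" then
          (st.1 ++ [(PySem.Str.slice item none (some 2),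
                     PySem.Str.slice item (some 2) none)], none)
        else (st.1, some (PySem.Str.slice item none (some 2))))
    ([], none)).1

-- ===== PRECONDITION & SPEC =====
-- Pre_ excludes exactly the inputs on which A raises IndexError: a list in which some
-- nonempty option of length ≤ 2 (a bare flag) is not followed by a further element.
def pvOk_walk_options_py : List String → Bool
  | [] => true
  | x :: rest =>
    if x = "" || decide (2 < x.toList.length) then pvOk_walk_options_py rest
    else
      match rest with
      | [] => false
      | _ :: rest' => pvOk_walk_options_py rest' 

def Pre_walk_options_py (options : List String) : Prop := pvOk_walk_options_py options = true
instance (options : List String) : Decidable (Pre_walk_options_py options) := by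
  unfold Pre_walk_options_py; infer_instance

def pvWitness_walk_options_py : List String := ["-v", "--debug", "-o", "out.txt", ""]

def Spec_walk_options_py (options : List String) (out : List (String × String)) : Prop :=
  out = walk_options_py_alt options
instance (options : List String) (out : List (String × String)) :
    Decidable (Spec_walk_options_py options out) := by unfold Spec_walk_options_py; infer_instance

-- ===== CLAIM (what is proved, stated in full; the proofs are below) =====
def Claim_equal_walk_options_py : Prop := ∀ (options : List String),
  Dom_walk_options_py options → Pre_walk_options_py options →
    Spec_walk_options_py options (walk_options_py options)

-- ===== LEMMAS AND PROOFS =====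

lemma pvTake2_nil_iff (l : List Char) : PySem.List.slice l none (some (2 : Int)) = [] ↔ l = [] := by
  rw [show ((2 : Int)) = ((2 : Nat) : Int) from rfl, PySem.List.slice_to_natCast]
  simp [List.take_eq_nil_iff]

lemma pvSlice_head_eq (x : String) :
    PySem.Str.slice x (some 0) (some 2) = PySem.Str.slice x none (some 2) := by
  simp [PySem.Str.slice]

lemma pvSlice_head_empty_iff (x : String) :
    PySem.Str.slice x (some 0) (some 2) = "" ↔ x = "" := by
  rw [pvSlice_head_eq]
  constructor
  · intro hc
    have := congrArg String.toList hc
    simp at this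
    exact String.toList_inj.mp (by simpa using (pvTake2_nil_iff x.toList).mp this)
  · intro h; subst h; rfl

lemma pvSlice_tail_empty_iff (x : String) :
    PySem.Str.slice x (some 2) none = "" ↔ ¬ 2 < x.toList.length := by
  constructor
  · intro hc
    have := congrArg String.toList hc
    rw [PySem.Str.toList_slice] at this
    simp only [PySem.Chars.slice_eq_listSlice,
      show ((2 : Int)) = ((2 : Nat) : Int) from rfl, PySem.List.slice_from_natCast] at this
    simp at this
    have hl := String.length_toList (s := x)
    omega
  · intro h
    apply String.toList_inj.mp
    rw [PySem.Str.toList_slice]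
    simp only [PySem.Chars.slice_eq_listSlice,
      show ((2 : Int)) = ((2 : Nat) : Int) from rfl, PySem.List.slice_from_natCast]
    simp
    have hl := String.length_toList (s := x)
    omega

-- loop invariant: folding B's step from state (acc, none) over a well-formed list appends
-- exactly A's yield sequence to acc
lemma pvFold_inv (n : Nat) (options : List String) (hlen : options.length ≤ n)
    (h : pvOk_walk_options_py options = true) (acc : List (String × String)) :
    (options.foldl
      (fun (st : List (String × String) × Option String) item =>
        match st.2 with
        | some flag => (st.1 ++ [(flag, item)], none)
        | none =>
          if item = "" then st
          else if PySem.Str.slice item (some 2) none ≠ "" then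
            (st.1 ++ [(PySem.Str.slice item none (some 2),
                       PySem.Str.slice item (some 2) none)], none)
          else (st.1, some (PySem.Str.slice item none (some 2))))
      (acc, none)).1 = acc ++ walk_options_py options := by
  induction n generalizing options acc with
  | zero =>
    have : options = [] := List.eq_nil_of_length_eq_zero (by omega)
    subst this
    simp [walk_options_py]
  | succ n ih =>
    cases options with
    | nil => simp [walk_options_py]
    | cons x rest =>
      rw [walk_options_py]
      rw [pvOk_walk_options_py.eq_def] at h
      by_cases hx : x = ""
      · have hflag : PySem.Str.slice x (some 0) (some 2) = "" :=
          (pvSlice_head_empty_iff x).mpr hx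
        simp only [hx, decide_true, Bool.true_or, reduceIte] at h
        simp only [List.foldl_cons, hflag, reduceIte,
          PySem.List.slice_from_one, List.tail_cons]
        rw [if_pos hx]
        exact ih rest (by simp at hlen; omega) h acc
      · have hflag : PySem.Str.slice x (some 0) (some 2) ≠ "" :=
          fun hc => hx ((pvSlice_head_empty_iff x).mp hc)
        by_cases h2 : 2 < x.toList.length
        · have htail : PySem.Str.slice x (some 2) none ≠ "" := by
            rw [ne_eq, pvSlice_tail_empty_iff]; omega
          simp only [hx, h2, decide_true, Bool.or_true, reduceIte] at h
          simp only [List.foldl_cons, if_neg hx, htail, ne_eq,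
            PySem.List.slice_from_one, List.tail_cons, pvSlice_head_eq]
          have hflag' : PySem.Str.slice x none (some 2) ≠ "" := by
            rw [← pvSlice_head_eq]; exact hflag
          simp only [hflag', not_false_eq_true, if_true]
          rw [ih rest (by simp at hlen; omega) h _, List.append_assoc]
          simp
        · have htail : PySem.Str.slice x (some 2) none = "" :=
            (pvSlice_tail_empty_iff x).mpr h2
          simp only [hx, h2, decide_false, Bool.or_self] at h
          cases rest with
          | nil => simp at h
          | cons y rest' =>
            have h' : pvOk_walk_options_py rest' = true := by simpa using h
            have hget : PySem.List.pyGet? (x :: y :: rest') (1 : Int) = some y := by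
              simp [PySem.List.pyGet?, PySem.List.pyIdx?]
            have hdrop : PySem.List.slice (x :: y :: rest') (some (2 : Int)) none = rest' := by
              rw [show ((2 : Int)) = ((2 : Nat) : Int) from rfl, PySem.List.slice_from_natCast]
              rfl
            simp only [hget, hdrop]
            simp only [List.foldl_cons, if_neg hx, htail, ne_eq, not_true_eq_false,
              reduceIte, pvSlice_head_eq]
            have hflag' : PySem.Str.slice x none (some 2) ≠ "" := by
              rw [← pvSlice_head_eq]; exact hflag
            simp only [hflag']
            rw [ih rest' (by simp at hlen; omega) h' _, List.append_assoc]
            simp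

-- ===== VERDICT (by name: the statement is the Claim_ definition above) =====
theorem walk_options_py_spec : Claim_equal_walk_options_py := by
  intro options _ hpre
  unfold Spec_walk_options_py walk_options_py_alt
  rw [pvFold_inv options.length options le_rfl hpre []]
  simp
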